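-- pv_equiv track=rewrite | github.com/gunjanbhogal6-lgtm/MCC | pipeline/utils/content_intelligence.py | _find_keyword_positions
-- ===== SOURCE A (Python) =====
-- from typing import Dict, List, Tuple
--
-- def _find_keyword_positions(content: str, keyword: str) -> List[int]:
--     """Find all positions of keyword in content"""
--     keyword_lower = keyword.lower()
--     content_lower = content.lower()
--     positions = []
--
--     start = 0
--     while True:
--         pos = content_lower.find(keyword_lower, start)
--         if pos == -1:
--             break
--         positions.append(pos)
--         start = pos + 1
--
--     return positions[:20]  # Top 20 positions
-- ===== SOURCE B (Python) =====
-- def _find_keyword_positions(content: str, keyword: str) -> list: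
--     """Find all positions of keyword in content (case-insensitive), first 20.
--
--     Builds a char -> positions index once, then verifies only the positions
--     of the keyword's first character by slice comparison."""
--     keyword_lower = keyword.lower()
--     content_lower = content.lower()
--     if not keyword_lower:
--         return list(range(len(content_lower) + 1))[:20]
--     index = {}
--     for ch, i in zip(content_lower, range(len(content_lower))):
--         index.setdefault(ch, []).append(i)
--     m = len(keyword_lower)
--     candidates = index.get(keyword_lower[0], [])
--     positions = [i for i in candidates if content_lower[i:i + m] == keyword_lower]
--     return positions[:20]
-- ===== Notes on version B (the rewrite author's own statement) =====
-- stated objective: alternative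
-- what changed: B builds a char->positions index in one pass over the lowered content and then checks, by slice comparison, only the recorded positions of the keyword's first character (all positions for the empty keyword), instead of A's while-loop of repeated str.find calls.
import Mathlib
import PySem

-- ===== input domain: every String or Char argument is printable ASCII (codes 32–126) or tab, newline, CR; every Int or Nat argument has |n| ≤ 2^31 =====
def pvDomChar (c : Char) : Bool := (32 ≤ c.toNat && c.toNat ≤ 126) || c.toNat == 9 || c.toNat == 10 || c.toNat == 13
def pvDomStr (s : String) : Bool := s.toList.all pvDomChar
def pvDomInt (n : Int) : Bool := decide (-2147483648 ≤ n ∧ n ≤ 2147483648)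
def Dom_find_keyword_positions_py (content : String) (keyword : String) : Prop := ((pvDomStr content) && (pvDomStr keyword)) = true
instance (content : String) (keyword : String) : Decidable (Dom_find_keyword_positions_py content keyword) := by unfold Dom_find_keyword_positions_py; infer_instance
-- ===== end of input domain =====

-- B replaces A's repeated str.find loop by a one-pass char->positions index followed by a
-- slice check of the first-char candidates (objective: alternative; same results).

-- ===== PORT A =====
-- while-True loop of A; 'fuel' only makes the recursion total (the loop ends within
-- cl.length + 2 iterations, proved below), every step is A's step.
def pvALoop (cl kl : List Char) (fuel : Nat) (start : Nat) (acc : List Int) : List Int :=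
  match fuel with
  | 0 => acc
  | fuel + 1 =>
    let pos := PySem.Chars.findFrom cl kl (start : Int) none
    if pos = -1 then acc
    else pvALoop cl kl fuel (pos.toNat + 1) (acc ++ [pos])

def find_keyword_positions_py (content : String) (keyword : String) : List Int :=
  let keyword_lower := PySem.Str.lower keyword
  let content_lower := PySem.Str.lower content
  let positions := pvALoop content_lower.toList keyword_lower.toList
      (content_lower.toList.length + 2) 0 []
  positions.take 20   -- positions[:20]

-- ===== PORT B =====
-- for ch, i in zip(content_lower, range(len(content_lower))): index.setdefault(ch, []).append(i)
-- (setdefault(ch, []) followed by in-place append == Dict.modify ch [] (· ++ [i]))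
def pvBIndex (cl : List Char) : PySem.Dict Char (List Int) :=
  (cl.zip (PySem.List.pyRange 0 (cl.length : Int) 1)).foldl
    (fun d p => d.modify p.1 [] (· ++ [p.2])) PySem.Dict.empty

def find_keyword_positions_py_alt (content : String) (keyword : String) : List Int :=
  let keyword_lower := (PySem.Str.lower keyword).toList
  let content_lower := (PySem.Str.lower content).toList
  if keyword_lower.isEmpty then
    -- list(range(len(content_lower) + 1))[:20]
    (PySem.List.pyRange 0 ((content_lower.length : Int) + 1) 1).take 20
  else
    let index := pvBIndex content_lower
    let m := keyword_lower.length
    let candidates := index.getD keyword_lower.headI []   -- keyword_lower[0]; nonempty here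
    let positions := candidates.filter
      (fun i => PySem.List.slice content_lower (some i) (some (i + (m : Int))) == keyword_lower)
    positions.take 20

-- ===== PRECONDITION & SPEC =====
def Spec_find_keyword_positions_py (content : String) (keyword : String) (out : List Int) : Prop := out = find_keyword_positions_py_alt content keyword
instance (content : String) (keyword : String) (out : List Int) : Decidable (Spec_find_keyword_positions_py content keyword out) := by unfold Spec_find_keyword_positions_py; infer_instance

-- ===== CLAIM (what is proved, stated in full; the proofs are below) =====
def Claim_equal_find_keyword_positions_py : Prop := ∀ (content : String) (keyword : String), Dom_find_keyword_positions_py content keyword → Spec_find_keyword_positions_py content keyword (find_keyword_positions_py content keyword)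

-- ===== LEMMAS AND PROOFS =====

def pvInts (xs : List Nat) : List Int := xs.map Int.ofNat

-- the common characterization: the filtered list of all match positions in [k, len]
def pvMatches (cl kl : List Char) (k : Nat) : List Nat :=
  (List.range' k (cl.length + 1 - k)).filter (fun j => PySem.Chars.startswith (cl.drop j) kl)

lemma pvMatch_infix {cl kl : List Char} {k j : Nat} (hkj : k ≤ j)
    (h : kl <+: cl.drop j) : kl <:+: cl.drop k := by
  have : cl.drop j = (cl.drop k).drop (j - k) := by
    rw [List.drop_drop]; congr 1; omega
  exact h.isInfix.trans (this ▸ (List.drop_suffix (j - k) (cl.drop k)).isInfix)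

lemma pvMatches_neg {cl kl : List Char} {k : Nat} (hk : k ≤ cl.length)
    (h : PySem.Chars.findFrom cl kl (k : Int) none = -1) :
    pvMatches cl kl k = [] := by
  rw [PySem.Chars.findFrom_natCast_eq_neg_one_iff cl kl k hk] at h
  refine List.filter_eq_nil_iff.2 ?_
  intro j hj hp
  rw [List.mem_range'_1] at hj
  exact h (pvMatch_infix hj.1 ((PySem.Chars.startswith_iff _ _).1 hp))

lemma pvMatches_pos {cl kl : List Char} {k : Nat} (hk : k ≤ cl.length)
    (h : PySem.Chars.findFrom cl kl (k : Int) none ≠ -1) :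
    k ≤ (PySem.Chars.findFrom cl kl (k : Int) none).toNat ∧
    (PySem.Chars.findFrom cl kl (k : Int) none).toNat ≤ cl.length ∧
    0 ≤ PySem.Chars.findFrom cl kl (k : Int) none ∧
    pvMatches cl kl k =
      (PySem.Chars.findFrom cl kl (k : Int) none).toNat ::
        pvMatches cl kl ((PySem.Chars.findFrom cl kl (k : Int) none).toNat + 1) := by
  have hf := PySem.Chars.findFrom_natCast cl kl k hk
  set f := PySem.Chars.find (cl.drop k) kl with hfdef
  have hne : f ≠ -1 := by
    intro hc
    apply h
    rw [hf, if_pos hc]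
  have hFF : PySem.Chars.findFrom cl kl (k : Int) none = (k : Int) + f := by
    rw [hf, if_neg hne]
  have hf0 : 0 ≤ f := by
    have := PySem.Chars.neg_one_le_find (cl.drop k) kl
    rw [← hfdef] at this
    omega
  have hfle : f ≤ ((cl.drop k).length : Int) := PySem.Chars.find_le_length (cl.drop k) kl
  have hlen : (cl.drop k).length = cl.length - k := by simp
  obtain ⟨hpre, hmin⟩ := PySem.Chars.find_spec (s := cl.drop k) (sub := kl) hf0
  rw [← hfdef] at hpre hmin
  set p := k + f.toNat with hpdef
  have hcast : ((k : Int) + f).toNat = p := by omega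
  have hple : p ≤ cl.length := by omega
  rw [hFF, hcast]
  refine ⟨by omega, hple, by omega, ?_⟩
  have hdropp : (cl.drop k).drop f.toNat = cl.drop p := by rw [List.drop_drop]
  have hsplit : List.range' k (cl.length + 1 - k) =
      List.range' k f.toNat ++ List.range' p (cl.length + 1 - p) := by
    rw [show cl.length + 1 - k = f.toNat + (cl.length + 1 - p) by omega]
    rw [← List.range'_append (step := 1)]; simp [hpdef]
  unfold pvMatches
  rw [hsplit, List.filter_append]
  have h1 : (List.range' k f.toNat).filter
      (fun j => PySem.Chars.startswith (cl.drop j) kl) = [] := by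
    refine List.filter_eq_nil_iff.2 ?_
    intro j hj hp'
    rw [List.mem_range'_1] at hj
    have hdj : cl.drop j = (cl.drop k).drop (j - k) := by
      rw [List.drop_drop]; congr 1; omega
    exact hmin (j - k) (by omega) (hdj ▸ (PySem.Chars.startswith_iff _ _).1 hp')
  have h2 : List.range' p (cl.length + 1 - p) =
      p :: List.range' (p + 1) (cl.length + 1 - (p + 1)) := by
    rw [show cl.length + 1 - p = (cl.length + 1 - (p+1)) + 1 by omega]
    rw [List.range'_succ]
  rw [h1, h2]
  simp only [List.nil_append, List.filter_cons]
  have hP : PySem.Chars.startswith (cl.drop p) kl = true :=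
    (PySem.Chars.startswith_iff _ _).2 (hdropp ▸ hpre)
  rw [hP]
  rfl

lemma pvFindFrom_past (cl kl : List Char) :
    PySem.Chars.findFrom cl kl ((cl.length + 1 : Nat) : Int) none = -1 := by
  simp [PySem.Chars.findFrom]
  intro h
  exact absurd h (by omega)

lemma pvALoop_eq (cl kl : List Char) :
    ∀ (fuel k : Nat) (acc : List Int), cl.length + 2 ≤ fuel + k → k ≤ cl.length + 1 →
      pvALoop cl kl fuel k acc = acc ++ pvInts (pvMatches cl kl k) := by
  intro fuel
  induction fuel with
  | zero => intro k acc h1 h2; omega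
  | succ fuel ih =>
    intro k acc h1 h2
    unfold pvALoop
    simp only
    rcases Nat.lt_or_ge k (cl.length + 1) with hk | hk
    · have hk' : k ≤ cl.length := by omega
      by_cases hpos : PySem.Chars.findFrom cl kl (k : Int) none = -1
      · rw [if_pos hpos, pvMatches_neg hk' hpos]
        simp [pvInts]
      · rw [if_neg hpos]
        obtain ⟨hkp, hpl, h0, hmat⟩ := pvMatches_pos hk' hpos
        rw [ih ((PySem.Chars.findFrom cl kl (k : Int) none).toNat + 1)
            (acc ++ [PySem.Chars.findFrom cl kl (k : Int) none]) (by omega) (by omega)]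
        rw [hmat]
        have hcast : (Int.ofNat (PySem.Chars.findFrom cl kl (k : Int) none).toNat) =
            PySem.Chars.findFrom cl kl (k : Int) none := by
          simpa using Int.toNat_of_nonneg h0
        simp only [pvInts, List.map_cons, List.append_assoc, List.singleton_append, hcast]
    · have hkeq : k = cl.length + 1 := by omega
      subst hkeq
      rw [if_pos (pvFindFrom_past cl kl)]
      unfold pvMatches
      simp [pvInts]

-- B's index lookup: the recorded positions of c are exactly the indices of c, in order
lemma pvStartswith_nil_cons (k0 : Char) (kr : List Char) :
    PySem.Chars.startswith ([] : List Char) (k0 :: kr) = false := by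
  rw [Bool.eq_false_iff]
  intro h
  exact absurd ((PySem.Chars.startswith_iff _ _).1 h).length_le (by simp)

lemma pvZipFilter (cl : List Char) (c : Char) :
    ∀ (n s : Nat), n = cl.length - s → s ≤ cl.length →
      (((cl.drop s).zip ((List.range' s n).map Int.ofNat)).filter
          (fun p => p.1 == c)).map (·.2) =
        pvInts ((List.range' s n).filter
          (fun j => (cl.getD j c == c) && decide (j < cl.length))) := by
  intro n
  induction n with
  | zero => intro s _ _; simp [pvInts]
  | succ n ih =>
    intro s hn hs
    have hslt : s < cl.length := by omega
    have hdrop : cl.drop s = cl[s] :: cl.drop (s + 1) :=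
      List.drop_eq_getElem_cons hslt
    have hgd : cl.getD s c = cl[s] := List.getD_eq_getElem cl c hslt
    have hrest := ih (s + 1) (by omega) (by omega)
    rw [List.range'_succ, hdrop]
    simp only [List.map_cons, List.zip_cons_cons, List.filter_cons, hgd, hslt,
      decide_true, Bool.and_true]
    by_cases hc : (cl[s] == c) = true
    · simp only [hc, if_true, List.map_cons, pvInts, hrest]
    · simp only [hc, if_false, Bool.false_eq_true]
      exact hrest

lemma pvBIndex_getD (cl : List Char) (c : Char) :
    (pvBIndex cl).getD c [] =
      pvInts ((List.range' 0 cl.length).filter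
        (fun j => (cl.getD j c == c) && decide (j < cl.length))) := by
  unfold pvBIndex
  rw [PySem.Dict.getD_foldl_modify_append, PySem.Dict.getD_empty,
    PySem.List.pyRange_zero_natCast]
  have h := pvZipFilter cl c cl.length 0 (by omega) (by omega)
  simpa [List.range_eq_range', Int.ofNat_eq_natCast] using h

-- filter by (first char ∧ slice match) over [0,n) equals filter by startswith over [0,n]
lemma pvFilter_bridge (cl : List Char) (k0 : Char) (kr : List Char) :
    ((List.range' 0 cl.length).filter
        (fun j => (cl.getD j k0 == k0) && decide (j < cl.length))).filter
        (fun j => (cl.drop j).take (kr.length + 1) == k0 :: kr) =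
      (List.range' 0 (cl.length + 1)).filter
        (fun j => PySem.Chars.startswith (cl.drop j) (k0 :: kr)) := by
  rw [List.filter_filter]
  have hlast : (List.range' 0 (cl.length + 1)).filter
        (fun j => PySem.Chars.startswith (cl.drop j) (k0 :: kr)) =
      (List.range' 0 cl.length).filter
        (fun j => PySem.Chars.startswith (cl.drop j) (k0 :: kr)) := by
    rw [List.range'_1_concat, List.filter_append]
    simp [List.drop_length, pvStartswith_nil_cons]
  rw [hlast]
  apply List.filter_congr
  intro j hj
  rw [List.mem_range'_1] at hj
  have hjlt : j < cl.length := by omega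
  have hgd : cl.getD j k0 = cl[j] := List.getD_eq_getElem cl k0 hjlt
  have hd : cl.drop j = cl[j] :: cl.drop (j + 1) := List.drop_eq_getElem_cons hjlt
  rw [show ∀ x y : Bool, x = y ↔ (x = true ↔ y = true) from by decide]
  simp only [Bool.and_eq_true, beq_iff_eq, decide_eq_true_eq, hgd,
    PySem.Chars.startswith_iff, hjlt, and_true]
  constructor
  · rintro ⟨htake, _⟩
    exact htake ▸ List.take_prefix _ _
  · intro hpre
    have htake : (cl.drop j).take (kr.length + 1) = k0 :: kr := by
      have h1 := List.prefix_iff_eq_take.1 hpre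
      simpa using h1.symm
    refine ⟨htake, ?_⟩
    rw [hd] at hpre
    exact (List.cons_prefix_cons.1 hpre).1.symm

-- ===== VERDICT (by name: the statement is the Claim_ definition above) =====
set_option maxHeartbeats 1000000 in
theorem find_keyword_positions_py_spec : Claim_equal_find_keyword_positions_py := by
  intro content keyword _
  unfold Spec_find_keyword_positions_py
  unfold find_keyword_positions_py find_keyword_positions_py_alt
  simp only
  rw [pvALoop_eq _ _ _ 0 [] (by omega) (by omega), List.nil_append]
  generalize (PySem.Str.lower content).toList = cl
  generalize (PySem.Str.lower keyword).toList = kl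
  unfold pvMatches
  simp only [Nat.sub_zero]
  cases kl with
  | nil =>
    have hT : ∀ j, PySem.Chars.startswith (cl.drop j) ([] : List Char) = true :=
      fun j => (PySem.Chars.startswith_iff _ _).2 List.nil_prefix
    have hcast : ((cl.length : Int) + 1) = ((cl.length + 1 : Nat) : Int) := by push_cast; ring
    simp only [List.isEmpty_nil, if_true]
    rw [hcast, PySem.List.pyRange_zero_natCast]
    simp [hT, pvInts, List.range_eq_range']
    rfl
  | cons k0 kr =>
    simp only [List.isEmpty_cons, Bool.false_eq_true, if_false, List.headI]
    rw [pvBIndex_getD cl k0]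
    congr 1
    rw [← pvFilter_bridge cl k0 kr]
    unfold pvInts
    rw [List.filter_map]
    congr 1
    apply List.filter_congr
    intro j hj
    have hslice := PySem.List.slice_natCast_add cl j (kr.length + 1)
    simp only [Function.comp_apply, List.length_cons]
    rw [show (Int.ofNat j) = ((j : Nat) : Int) from rfl, hslice]
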